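-- pv_equiv track=rewrite | github.com/kamperh/dpdp_aernn | run_brent.py | get_segmented_sentence
-- ===== SOURCE A (Python) =====
-- def get_segmented_sentence(ids, boundaries, id_to_symbol, join_char=""):
--     output = ""
--     cur_word = []
--     for i_symbol, boundary in enumerate(boundaries):
--         cur_word.append(id_to_symbol[ids[i_symbol]])
--         if boundary:
--             output += join_char.join(cur_word)
--             output += " "
--             cur_word = []
--     return output.strip()
-- ===== SOURCE B (Python) =====
-- def get_segmented_sentence(ids, boundaries, id_to_symbol, join_char=""):
--     # Phase 1: scan boundaries for the positions at which a word ends.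
--     cuts = [i for i, b in enumerate(boundaries) if b]
--     # Phase 2: turn consecutive cut positions into index ranges and build each word
--     # by indexing element-by-element; symbols after the last cut belong to no word.
--     segments = []
--     start = 0
--     for c in cuts:
--         segments.append(join_char.join(id_to_symbol[ids[i]] for i in range(start, c + 1)))
--         start = c + 1
--     return " ".join(segments).strip()
-- ===== Notes on version B (the rewrite author's own statement) =====
-- stated objective: alternative
-- what changed: Replaces A's single streaming pass that accumulates a cur_word list and concatenates each finished word (plus a space) onto a growing output string with a two-phase segmentation: first collect the boundary cut positions, then turn consecutive cuts into index ranges, build each word from its range and join all words once with ' '.join.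
import Mathlib
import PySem

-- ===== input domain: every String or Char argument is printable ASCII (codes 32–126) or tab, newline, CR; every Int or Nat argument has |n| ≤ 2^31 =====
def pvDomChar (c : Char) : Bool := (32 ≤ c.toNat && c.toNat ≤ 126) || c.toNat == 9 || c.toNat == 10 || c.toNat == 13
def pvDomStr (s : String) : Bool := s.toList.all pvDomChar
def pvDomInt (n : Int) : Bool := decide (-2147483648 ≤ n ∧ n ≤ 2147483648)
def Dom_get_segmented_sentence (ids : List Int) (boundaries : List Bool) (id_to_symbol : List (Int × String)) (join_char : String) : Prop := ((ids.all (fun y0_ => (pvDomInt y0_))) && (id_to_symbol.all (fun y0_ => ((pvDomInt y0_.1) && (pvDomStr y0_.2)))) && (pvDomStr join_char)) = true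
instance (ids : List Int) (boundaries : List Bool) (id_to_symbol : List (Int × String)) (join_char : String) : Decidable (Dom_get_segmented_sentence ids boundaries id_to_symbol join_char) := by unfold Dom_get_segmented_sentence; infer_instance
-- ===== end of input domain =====

-- B re-derives the same sentence by a two-phase segmentation (collect cut positions, then build
-- each word from its index range) instead of A's streaming accumulate-and-concatenate; objective:
-- alternative decomposition, same cost.

-- ===== PORT A =====
-- A: one streaming pass over enumerate(boundaries), state = (output, cur_word);
-- ids[i] via pyGet?, dict lookup = first-match assoc lookup; the .getD defaults are
-- exact under Pre_, which excludes the IndexError/KeyError inputs.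
def pvA_step (ids : List Int) (id_to_symbol : List (Int × String)) (join_char : String)
    (st : String × List String) (p : Int × Bool) : String × List String :=
  let cur' := st.2 ++ [(id_to_symbol.lookup ((PySem.List.pyGet? ids p.1).getD 0)).getD ""]
  if p.2 then (st.1 ++ PySem.Str.join join_char cur' ++ " ", []) else (st.1, cur')

def get_segmented_sentence (ids : List Int) (boundaries : List Bool) (id_to_symbol : List (Int × String)) (join_char : String) : String :=
  PySem.Str.strip ((PySem.List.enumerate boundaries).foldl (pvA_step ids id_to_symbol join_char) ("", [])).1

-- ===== PORT B =====
-- B: phase 1 collects the cut positions; phase 2 turns consecutive cuts into index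
-- ranges and builds each word by per-element indexing (same lookup convention as A).
def pvB_word (ids : List Int) (id_to_symbol : List (Int × String)) (join_char : String)
    (start stop : Int) : String :=
  PySem.Str.join join_char ((PySem.List.pyRange start stop).map
    (fun i => (id_to_symbol.lookup ((PySem.List.pyGet? ids i).getD 0)).getD ""))

def pvB_loop (ids : List Int) (id_to_symbol : List (Int × String)) (join_char : String) :
    List Int → Int → List String → List String
  | [], _, segs => segs
  | c :: cs, start, segs =>
      pvB_loop ids id_to_symbol join_char cs (c + 1)
        (segs ++ [pvB_word ids id_to_symbol join_char start (c + 1)])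

def get_segmented_sentence_alt (ids : List Int) (boundaries : List Bool) (id_to_symbol : List (Int × String)) (join_char : String) : String :=
  let cuts := ((PySem.List.enumerate boundaries).filter (fun p => p.2)).map (fun p => p.1)
  PySem.Str.strip (PySem.Str.join " " (pvB_loop ids id_to_symbol join_char cuts 0 []))

-- ===== PRECONDITION & SPEC =====
-- Pre_ excludes exactly the inputs where Python A raises: an ids list shorter than
-- boundaries (IndexError) or a looked-up id missing from id_to_symbol (KeyError).
def Pre_get_segmented_sentence (ids : List Int) (boundaries : List Bool) (id_to_symbol : List (Int × String)) (join_char : String) : Prop :=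
  boundaries.length ≤ ids.length ∧
  ∀ i < boundaries.length, (id_to_symbol.lookup (ids.getD i 0)).isSome = true
instance (ids : List Int) (boundaries : List Bool) (id_to_symbol : List (Int × String)) (join_char : String) : Decidable (Pre_get_segmented_sentence ids boundaries id_to_symbol join_char) := by unfold Pre_get_segmented_sentence; infer_instance

def pvWitness_get_segmented_sentence : List Int × List Bool × (List (Int × String)) × String :=
  ([0, 1, 0], [false, true, true], [(0, "a"), (1, "b")], "")

def Spec_get_segmented_sentence (ids : List Int) (boundaries : List Bool) (id_to_symbol : List (Int × String)) (join_char : String) (out : String) : Prop := out = get_segmented_sentence_alt ids boundaries id_to_symbol join_char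
instance (ids : List Int) (boundaries : List Bool) (id_to_symbol : List (Int × String)) (join_char : String) (out : String) : Decidable (Spec_get_segmented_sentence ids boundaries id_to_symbol join_char out) := by unfold Spec_get_segmented_sentence; infer_instance

-- ===== CLAIM (what is proved, stated in full; the proofs are below) =====
def Claim_equal_get_segmented_sentence : Prop := ∀ (ids : List Int) (boundaries : List Bool) (id_to_symbol : List (Int × String)) (join_char : String), Dom_get_segmented_sentence ids boundaries id_to_symbol join_char → Pre_get_segmented_sentence ids boundaries id_to_symbol join_char → Spec_get_segmented_sentence ids boundaries id_to_symbol join_char (get_segmented_sentence ids boundaries id_to_symbol join_char)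

-- ===== LEMMAS AND PROOFS =====

-- the symbol looked up at index i (shared shorthand for the proofs)
def pvSym (ids : List Int) (d : List (Int × String)) (i : Int) : String :=
  (d.lookup ((PySem.List.pyGet? ids i).getD 0)).getD ""

-- canonical word list: the words A's pass emits / B's ranges produce
def pvWords (ids : List Int) (d : List (Int × String)) (jc : String) :
    List Bool → Int → List String → List String
  | [], _, _ => []
  | b :: bs, s, cur =>
      if b then PySem.Str.join jc (cur ++ [pvSym ids d s]) :: pvWords ids d jc bs (s + 1) []
      else pvWords ids d jc bs (s + 1) (cur ++ [pvSym ids d s])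

def pvTrail : List String → String
  | [] => ""
  | w :: ws => w ++ " " ++ pvTrail ws

def pvCuts : List Bool → Int → List Int
  | [], _ => []
  | b :: bs, s => if b then s :: pvCuts bs (s + 1) else pvCuts bs (s + 1)

theorem pvA_loop_eq (ids : List Int) (d : List (Int × String)) (jc : String) :
    ∀ (bs : List Bool) (s : Int) (out : String) (cur : List String),
      ((PySem.List.enumerate bs s).foldl (pvA_step ids d jc) (out, cur)).1
        = out ++ pvTrail (pvWords ids d jc bs s cur) := by
  intro bs
  induction bs with
  | nil => intro s out cur; simp [PySem.List.enumerate_nil, pvWords, pvTrail]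
  | cons b bs ih =>
      intro s out cur
      rw [PySem.List.enumerate_cons]
      by_cases hb : b
      · subst hb
        simp only [List.foldl_cons, pvA_step, pvWords]
        rw [ih]
        simp [pvSym, pvTrail, String.append_assoc]
      · simp only [Bool.not_eq_true] at hb; subst hb
        simp only [List.foldl_cons, pvA_step, pvWords]
        rw [ih]
        simp [pvSym]

theorem pvCuts_eq : ∀ (bs : List Bool) (s : Int),
    ((PySem.List.enumerate bs s).filter (fun p => p.2)).map (fun p => p.1) = pvCuts bs s := by
  intro bs
  induction bs with
  | nil => intro s; simp [PySem.List.enumerate_nil, pvCuts]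
  | cons b bs ih =>
      intro s
      rw [PySem.List.enumerate_cons]
      by_cases hb : b
      · subst hb; simp [pvCuts, ih]
      · simp only [Bool.not_eq_true] at hb; subst hb; simp [pvCuts, ih]

theorem pvRange_self (a : Int) : PySem.List.pyRange a a = [] := by
  simp [PySem.List.pyRange]

theorem pvRange_concat {s i : Int} (h : s ≤ i) :
    PySem.List.pyRange s (i + 1) = PySem.List.pyRange s i ++ [i] := by
  rw [PySem.List.pyRange_one_append s i (i + 1) h (by omega)]
  congr 1
  rw [PySem.List.pyRange_one_cons (show i < i + 1 by omega), pvRange_self]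

theorem pvB_loop_eq (ids : List Int) (d : List (Int × String)) (jc : String) :
    ∀ (bs : List Bool) (s i : Int), s ≤ i → ∀ (segs : List String),
      pvB_loop ids d jc (pvCuts bs i) s segs
        = segs ++ pvWords ids d jc bs i ((PySem.List.pyRange s i).map (pvSym ids d)) := by
  intro bs
  induction bs with
  | nil => intro s i _ segs; simp [pvCuts, pvB_loop, pvWords]
  | cons b bs ih =>
      intro s i hsi segs
      cases b
      · simp only [pvCuts, pvWords, Bool.false_eq_true, if_false]
        rw [ih s (i + 1) (by omega)]
        rw [pvRange_concat hsi]
        simp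
      · simp only [pvCuts, pvWords, if_true, pvB_loop]
        rw [ih (i + 1) (i + 1) le_rfl]
        rw [pvRange_self]
        have hw : pvB_word ids d jc s (i + 1)
            = PySem.Str.join jc (List.map (pvSym ids d) (PySem.List.pyRange s i) ++ [pvSym ids d i]) := by
          rw [show pvB_word ids d jc s (i + 1)
                = PySem.Str.join jc (List.map (pvSym ids d) (PySem.List.pyRange s (i + 1))) from rfl,
              pvRange_concat hsi, List.map_append, List.map_cons, List.map_nil]
        rw [hw]
        simp

theorem pvJoin_cons_cons (w x : String) (ws : List String) :
    PySem.Str.join " " (w :: x :: ws) = w ++ " " ++ PySem.Str.join " " (x :: ws) := by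
  apply String.toList_inj.mp
  simp [PySem.Str.toList_join, PySem.Chars.join_cons_cons]

theorem pvJoin_singleton (w : String) : PySem.Str.join " " [w] = w := by
  apply String.toList_inj.mp
  simp [PySem.Str.toList_join, PySem.Chars.join, List.intercalate]

theorem pvTrail_eq : ∀ (ws : List String),
    pvTrail ws = if ws.isEmpty then "" else PySem.Str.join " " ws ++ " " := by
  intro ws
  induction ws with
  | nil => rfl
  | cons w ws ih =>
      cases ws with
      | nil => simp [pvTrail, pvJoin_singleton]
      | cons x ws =>
          have h1 : pvTrail (w :: x :: ws) = w ++ " " ++ pvTrail (x :: ws) := rfl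
          have h2 : (x :: ws).isEmpty = false := rfl
          rw [h1, ih, h2]
          simp only [Bool.false_eq_true, if_false, List.isEmpty_cons]
          rw [pvJoin_cons_cons]
          simp [String.append_assoc]

theorem pvStrip_space (cs : List Char) :
    PySem.Chars.strip (cs ++ [' ']) = PySem.Chars.strip cs := by
  have hsp : PySem.Chars.isspace ' ' = true := by decide
  simp only [PySem.Chars.strip, PySem.Chars.lstrip, PySem.Chars.rstrip]
  rw [List.dropWhile_append]
  by_cases h : (List.dropWhile PySem.Chars.isspace cs).isEmpty
  · rw [if_pos h]
    simp only [List.isEmpty_iff] at h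
    simp [h, List.dropWhile, hsp]
  · rw [if_neg h]
    simp [hsp]

theorem pvStrip_append_space (x : String) :
    PySem.Str.strip (x ++ " ") = PySem.Str.strip x := by
  apply String.toList_inj.mp
  simp only [PySem.Str.toList_strip, String.toList_append]
  have : (" " : String).toList = [' '] := rfl
  rw [this, pvStrip_space]

-- ===== VERDICT (by name: the statement is the Claim_ definition above) =====
theorem get_segmented_sentence_spec : Claim_equal_get_segmented_sentence := by
  intro ids boundaries id_to_symbol join_char _ _
  unfold Spec_get_segmented_sentence
  simp only [get_segmented_sentence, get_segmented_sentence_alt]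
  rw [pvA_loop_eq, pvCuts_eq, pvB_loop_eq ids id_to_symbol join_char boundaries 0 0 le_rfl]
  rw [pvRange_self]
  simp only [List.map_nil, List.nil_append, String.empty_append]
  rw [pvTrail_eq]
  cases h : (pvWords ids id_to_symbol join_char boundaries 0 []).isEmpty
  · rw [if_neg Bool.false_ne_true]
    rw [pvStrip_append_space]
  · rw [if_pos rfl]
    simp only [List.isEmpty_iff] at h
    rw [h]
    rfl
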